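-- pv_equiv track=rewrite | github.com/posl/comment_recommendation | script/mod_gen/3_time/ja/216_C/9.py | solve
-- ===== SOURCE A (Python) =====
-- def solve(N):
--     res = []
--     while N > 0:
--         if N % 2 == 1:
--             res.append('A')
--             N -= 1
--         else:
--             res.append('B')
--             N //= 2
--     res.reverse()
--     return "".join(res)
-- ===== SOURCE B (Python) =====
-- def solve(N):
--     if N <= 0:
--         return ""
--     if N % 2 == 1:
--         return solve(N - 1) + 'A'
--     return solve(N // 2) + 'B'
-- ===== Notes on version B (the rewrite author's own statement) =====
-- stated objective: simpler
-- what changed: Replaced the iterative list-accumulate-then-reverse-and-join loop with direct structural recursion on N that appends each character after the recursive call, building the string in final order with no list and no reverse.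
import Mathlib
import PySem

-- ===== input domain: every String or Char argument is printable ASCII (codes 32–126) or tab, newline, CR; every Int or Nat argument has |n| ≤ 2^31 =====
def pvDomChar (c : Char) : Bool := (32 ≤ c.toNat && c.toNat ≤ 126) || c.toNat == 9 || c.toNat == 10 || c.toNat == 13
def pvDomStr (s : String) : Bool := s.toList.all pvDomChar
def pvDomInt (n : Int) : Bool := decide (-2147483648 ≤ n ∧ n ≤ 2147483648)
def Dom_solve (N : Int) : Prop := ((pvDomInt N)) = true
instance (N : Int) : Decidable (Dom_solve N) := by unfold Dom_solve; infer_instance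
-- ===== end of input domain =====

-- B replaces A's accumulate-into-a-list-then-reverse-and-join loop by direct recursion on N
-- that appends each character after the recursive call (objective: simpler).

-- ===== PORT A =====
-- A's while loop: accumulate characters into res, then reverse and join.
def solveLoop (N : Int) (res : List Char) : List Char :=
  if _h : N > 0 then
    if PySem.Int.mod N 2 = 1 then
      solveLoop (N - 1) (res ++ ['A'])
    else
      solveLoop (PySem.Int.floordiv N 2) (res ++ ['B'])
  else res
termination_by N.toNat
decreasing_by
  · omega
  · have := PySem.Int.floordiv_eq_ediv_of_pos (a := N) (b := 2) (by omega)
    omega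

def solve (N : Int) : String := String.mk (solveLoop N []).reverse

-- ===== PORT B =====
def solve_alt (N : Int) : String :=
  if _h : N ≤ 0 then ""
  else if PySem.Int.mod N 2 = 1 then
    solve_alt (N - 1) ++ "A"
  else
    solve_alt (PySem.Int.floordiv N 2) ++ "B"
termination_by N.toNat
decreasing_by
  · omega
  · have := PySem.Int.floordiv_eq_ediv_of_pos (a := N) (b := 2) (by omega)
    omega

-- ===== PRECONDITION & SPEC =====
def Spec_solve (N : Int) (out : String) : Prop := out = solve_alt N
instance (N : Int) (out : String) : Decidable (Spec_solve N out) := by unfold Spec_solve; infer_instance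

-- ===== CLAIM (what is proved, stated in full; the proofs are below) =====
def Claim_equal_solve : Prop := ∀ (N : Int), Dom_solve N → Spec_solve N (solve N)

-- ===== LEMMAS AND PROOFS =====

theorem solveLoop_eq (N : Int) (res : List Char) :
    solveLoop N res = res ++ (solve_alt N).toList.reverse := by
  induction N, res using solveLoop.induct with
  | case1 N res h hm ih =>
    rw [solveLoop, solve_alt]
    simp only [h, dif_pos, if_pos hm, dif_neg (by omega : ¬ N ≤ 0), ih]
    simp
  | case2 N res h hm ih =>
    rw [solveLoop, solve_alt]
    simp only [h, dif_pos, if_neg hm, dif_neg (by omega : ¬ N ≤ 0), ih]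
    simp
  | case3 N res h =>
    rw [solveLoop, solve_alt]
    simp [h, dif_pos (by omega : N ≤ 0)]

-- ===== VERDICT (by name: the statement is the Claim_ definition above) =====
theorem solve_spec : Claim_equal_solve := by
  intro N _
  unfold Spec_solve solve
  rw [solveLoop_eq]
  simp [String.mk]
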